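-- pv_equiv track=rewrite | github.com/ssywin007/algorithms | dijkstra.py | heapreplace
-- ===== SOURCE A (Python) =====
-- def heapreplace(H, pos, new):
--     if H[pos][0] <= new:
--         return(H)
--     else:
--         H[pos] = (new, H[pos][1])
--         while pos > 0 and H[pos] < H[pos // 2]:
--             temp = H[pos]
--             H[pos] = H[pos // 2]
--             H[pos // 2] = temp
--             pos = pos // 2
--         return(H)
-- ===== SOURCE B (Python) =====
-- def heapreplace(H, pos, new):
--     if H[pos][0] <= new:
--         return H
--     item = (new, H[pos][1])
--     # phase 1: build the ancestor chain pos, pos//2, ..., 0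
--     chain = [pos]
--     while chain[-1] > 0:
--         chain.append(chain[-1] // 2)
--     # phase 2: scan the chain against the ORIGINAL heap to find the destination
--     dest = pos
--     for p in chain[1:]:
--         if item < H[p]:
--             dest = p
--         else:
--             break
--     # phase 3: one bulk move — each ancestor strictly above dest slides down one level
--     k = chain.index(dest)
--     for j in range(1, k + 1):
--         H[chain[j - 1]] = H[chain[j]]
--     H[dest] = item
--     return H
-- ===== Notes on version B (the rewrite author's own statement) =====
-- stated objective: alternative
-- what changed: Replaces A's single swap-at-a-time sift-up loop by three staged passes: materialise the ancestor chain pos, pos//2, ..., 0 as a list, scan that chain against the original (unmodified) heap to find the item's destination, then perform one bulk slide-down of the ancestors below the destination and a single placement of the item.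
import Mathlib
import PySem

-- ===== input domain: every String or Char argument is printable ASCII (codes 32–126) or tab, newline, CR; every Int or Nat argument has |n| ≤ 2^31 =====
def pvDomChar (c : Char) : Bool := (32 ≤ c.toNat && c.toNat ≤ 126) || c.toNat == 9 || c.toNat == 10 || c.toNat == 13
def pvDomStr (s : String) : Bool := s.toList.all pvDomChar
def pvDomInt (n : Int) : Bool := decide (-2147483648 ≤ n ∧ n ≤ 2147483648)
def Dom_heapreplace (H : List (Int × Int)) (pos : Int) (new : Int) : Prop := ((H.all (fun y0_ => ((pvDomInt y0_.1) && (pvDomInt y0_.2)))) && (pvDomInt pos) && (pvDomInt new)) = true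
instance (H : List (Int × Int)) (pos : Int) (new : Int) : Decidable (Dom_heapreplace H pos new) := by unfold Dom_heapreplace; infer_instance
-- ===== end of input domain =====

-- B replaces A's swap-at-a-time sift-up loop by three staged passes: materialise the
-- ancestor chain, search it for the destination against the original heap, then one
-- bulk slide-down and a single placement; both Pythons mutate H in place — the claim
-- is about the returned value.

-- Python's tuple comparison (a, b) < (c, d), lexicographic on ints (exact)
def pairLt (a b : Int × Int) : Bool := a.1 < b.1 || (a.1 == b.1 && a.2 < b.2)

-- Python's index wraparound for H[i], exact for -len ≤ i < len (Pre_ excludes the rest)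
def pyIdx (n : Nat) (i : Int) : Nat := (if i < 0 then i + n else i).toNat

-- ===== PORT A =====
-- the while loop: swap H[pos] and H[pos // 2] each iteration; pos stays an Int as in
-- Python (for pos ≤ 0 the guard fails and the loop body never indexes); pos / 2 on a
-- positive pos coincides with Python's pos // 2
def siftSwap (H : List (Int × Int)) (pos : Int) : List (Int × Int) :=
  if h : 0 < pos ∧ pairLt (H.getD (pyIdx H.length pos) (0, 0)) (H.getD (pyIdx H.length (pos / 2)) (0, 0)) then
    siftSwap ((H.set (pyIdx H.length pos) (H.getD (pyIdx H.length (pos / 2)) (0, 0))).set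
        (pyIdx H.length (pos / 2)) (H.getD (pyIdx H.length pos) (0, 0))) (pos / 2)
  else H
termination_by pos.toNat
decreasing_by omega

def heapreplace (H : List (Int × Int)) (pos : Int) (new : Int) : List (Int × Int) :=
  let i := pyIdx H.length pos
  if (H.getD i (0, 0)).1 ≤ new then H
  else siftSwap (H.set i (new, (H.getD i (0, 0)).2)) pos

-- ===== PORT B =====
-- phase 1: chain = [pos]; while chain[-1] > 0: chain.append(chain[-1] // 2)
def buildChain (pos : Int) : List Int :=
  if h : 0 < pos then pos :: buildChain (pos / 2) else [pos]
termination_by pos.toNat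
decreasing_by omega

-- phase 2: for p in chain[1:]: if item < H[p]: dest = p else break
def findDest (H : List (Int × Int)) (item : Int × Int) : List Int → Int → Int
  | [], dest => dest
  | p :: rest, dest =>
    if pairLt item (H.getD (pyIdx H.length p) (0, 0)) then findDest H item rest p
    else dest

-- phase 3: for j in range(1, k + 1): H[chain[j - 1]] = H[chain[j]]
-- (chain entries read with getD at their nonnegative value; inside the loop they are
-- in range, so this is exact for Python's chain[j])
def shiftDown (chain : List Int) (k : Nat) (H : List (Int × Int)) : List (Int × Int) :=
  (PySem.List.pyRange 1 ((k : Int) + 1) 1).foldl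
    (fun acc j =>
      acc.set (pyIdx acc.length (chain.getD (j - 1).toNat 0))
              (acc.getD (pyIdx acc.length (chain.getD j.toNat 0)) (0, 0))) H

def heapreplace_alt (H : List (Int × Int)) (pos : Int) (new : Int) : List (Int × Int) :=
  let i := pyIdx H.length pos
  if (H.getD i (0, 0)).1 ≤ new then H
  else
    let item := (new, (H.getD i (0, 0)).2)
    let chain := buildChain pos
    let dest := findDest H item (chain.drop 1) pos
    let k := (PySem.List.index? chain dest).getD 0
    let H' := shiftDown chain k H
    H'.set (pyIdx H'.length dest) item

-- ===== PRECONDITION & SPEC =====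
-- Pre_ excludes exactly the inputs where Python's H[pos] raises IndexError: pos outside [-len(H), len(H)).
def Pre_heapreplace (H : List (Int × Int)) (pos : Int) (new : Int) : Prop :=
  -(H.length : Int) ≤ pos ∧ pos < H.length
instance (H : List (Int × Int)) (pos : Int) (new : Int) : Decidable (Pre_heapreplace H pos new) := by unfold Pre_heapreplace; infer_instance
def pvWitness_heapreplace : (List (Int × Int)) × Int × Int := ([(5, 0), (3, 1)], 1, 1)

def Spec_heapreplace (H : List (Int × Int)) (pos : Int) (new : Int) (out : List (Int × Int)) : Prop := out = heapreplace_alt H pos new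
instance (H : List (Int × Int)) (pos : Int) (new : Int) (out : List (Int × Int)) : Decidable (Spec_heapreplace H pos new out) := by unfold Spec_heapreplace; infer_instance

-- ===== CLAIM (what is proved, stated in full; the proofs are below) =====
def Claim_equal_heapreplace : Prop := ∀ (H : List (Int × Int)) (pos : Int) (new : Int), Dom_heapreplace H pos new → Pre_heapreplace H pos new → Spec_heapreplace H pos new (heapreplace H pos new)

-- ===== LEMMAS AND PROOFS =====

-- proof-side intermediate: the hole form of the sift-up (shift parents down into the
-- hole, place the item once at the end)
def siftHole (H : List (Int × Int)) (pos : Int) (item : Int × Int) : List (Int × Int) :=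
  if h : 0 < pos ∧ pairLt item (H.getD (pyIdx H.length (pos / 2)) (0, 0)) then
    siftHole (H.set (pyIdx H.length pos) (H.getD (pyIdx H.length (pos / 2)) (0, 0))) (pos / 2) item
  else H.set (pyIdx H.length pos) item
termination_by pos.toNat
decreasing_by omega

-- Swapping up from pos on H.set i item equals shifting parents down onto H and placing item.
theorem siftSwap_eq_siftHole : ∀ (n : Nat) (pos : Int), pos.toNat = n →
    ∀ (H : List (Int × Int)) (item : Int × Int), pyIdx H.length pos < H.length →
    siftSwap (H.set (pyIdx H.length pos) item) pos = siftHole H pos item := by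
  intro n
  induction n using Nat.strong_induction_on with
  | _ n ih =>
    intro pos hn H item hlt
    rw [siftSwap, siftHole]
    by_cases hp : 0 < pos
    · have hip : pyIdx H.length pos = pos.toNat := by unfold pyIdx; split <;> omega
      have hip2 : pyIdx H.length (pos / 2) = pos.toNat / 2 := by unfold pyIdx; split <;> omega
      have hne : pos.toNat / 2 ≠ pos.toNat := by omega
      have hself : (H.set pos.toNat item)[pos.toNat]? = some item := by
        rw [← hip]; exact List.getElem?_set_self (hip ▸ hlt)
      have hpar : (H.set pos.toNat item)[pos.toNat / 2]? = H[pos.toNat / 2]? :=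
        List.getElem?_set_ne (Ne.symm hne)
      simp only [List.length_set, hip, hip2, List.getD, hself, hpar, Option.getD_some]
      by_cases hc : pairLt item (H[pos.toNat / 2]?.getD (0, 0)) = true
      · rw [dif_pos ⟨hp, hc⟩, dif_pos ⟨hp, hc⟩, List.set_set]
        have h2 : pyIdx (H.set pos.toNat (H[pos.toNat / 2]?.getD (0, 0))).length (pos / 2)
            = pos.toNat / 2 := by simp only [List.length_set]; exact hip2
        have := ih (pos / 2).toNat (by omega) (pos / 2) rfl
          (H.set pos.toNat (H[pos.toNat / 2]?.getD (0, 0))) item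
          (by rw [h2]; simp only [List.length_set]; omega)
        rw [h2] at this
        exact this
      · rw [dif_neg (fun h => hc h.2), dif_neg (fun h => hc h.2)]
    · rw [dif_neg (fun h => hp h.1), dif_neg (fun h => hp h.1)]

theorem findDest_nil (H : List (Int × Int)) (item : Int × Int) (d : Int) :
    findDest H item [] d = d := rfl

theorem findDest_cons (H : List (Int × Int)) (item : Int × Int) (p : Int)
    (rest : List Int) (d : Int) :
    findDest H item (p :: rest) d
      = if pairLt item (H.getD (pyIdx H.length p) (0, 0)) then findDest H item rest p
        else d := rfl

theorem shiftDown_length (chain : List Int) (k : Nat) (H : List (Int × Int)) :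
    (shiftDown chain k H).length = H.length := by
  unfold shiftDown
  generalize PySem.List.pyRange 1 ((k : Int) + 1) 1 = l
  induction l generalizing H with
  | nil => rfl
  | cons x xs ihl =>
    simp only [List.foldl_cons]
    rw [ihl]
    simp

theorem shiftDown_zero (chain : List Int) (H : List (Int × Int)) :
    shiftDown chain 0 H = H := by
  unfold shiftDown
  rw [PySem.List.pyRange_one_eq_nil (by norm_num)]
  rfl

theorem buildChain_eq (pos : Int) :
    buildChain pos = if 0 < pos then pos :: buildChain (pos / 2) else [pos] := by
  rw [buildChain]; split <;> simp_all

theorem buildChain_head (q : Int) : ∃ rest, buildChain q = q :: rest := by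
  rw [buildChain_eq]; split
  · exact ⟨_, rfl⟩
  · exact ⟨[], rfl⟩

theorem buildChain_le : ∀ (n : Nat) (q : Int), q.toNat = n → 0 ≤ q →
    ∀ p ∈ buildChain q, 0 ≤ p ∧ p ≤ q := by
  intro n
  induction n using Nat.strong_induction_on with
  | _ n ih =>
    intro q hn hq p hp
    rw [buildChain_eq] at hp
    split at hp
    · rcases List.mem_cons.mp hp with h | h
      · omega
      · have := ih (q / 2).toNat (by omega) (q / 2) rfl (by omega) p h
        omega
    · simp at hp; omega

theorem findDest_mem (H : List (Int × Int)) (item : Int × Int) :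
    ∀ (l : List Int) (d : Int), findDest H item l d = d ∨ findDest H item l d ∈ l := by
  intro l
  induction l with
  | nil => intro d; left; rfl
  | cons p rest ihl =>
    intro d
    unfold findDest
    split
    · rcases ihl p with h | h
      · right; rw [h]; exact List.mem_cons_self
      · right; exact List.mem_cons_of_mem _ h
    · left; rfl

-- findDest reads H only at the (nonnegative, < pos) chain positions, so a set at
-- pos.toNat does not change it
theorem findDest_set_high (H : List (Int × Int)) (item x : Int × Int) (pos : Int)
    (hpos : 0 < pos) :
    ∀ (l : List Int) (d : Int), (∀ p ∈ l, 0 ≤ p ∧ p < pos) →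
    findDest (H.set pos.toNat x) item l d = findDest H item l d := by
  intro l
  induction l with
  | nil => intro d _; rfl
  | cons p rest ihl =>
    intro d hl
    have hp := hl p List.mem_cons_self
    have hidx : pyIdx (H.set pos.toNat x).length p = p.toNat := by
      unfold pyIdx; simp only [List.length_set]; omega
    have hidx' : pyIdx H.length p = p.toNat := by unfold pyIdx; omega
    have hneq : pos.toNat ≠ p.toNat := by omega
    unfold findDest
    rw [hidx, hidx', List.getD_eq_getElem?_getD, List.getD_eq_getElem?_getD,
      List.getElem?_set_ne hneq]
    split
    · exact ihl p (fun q hq => hl q (List.mem_cons_of_mem _ hq))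
    · rfl

-- one unfolding of the bulk slide-down: the first loop iteration moves the head
-- parent's value into the head slot, the rest is the slide-down on the tail chain
theorem shiftDown_cons (p q : Int) (rest : List Int) (k : Nat) (H : List (Int × Int)) :
    shiftDown (p :: q :: rest) (k + 1) H =
      shiftDown (q :: rest) k
        (H.set (pyIdx H.length p) (H.getD (pyIdx H.length q) (0, 0))) := by
  unfold shiftDown
  have h1 : (((k + 1 : Nat) : Int) + 1) = (k : Int) + 2 := by push_cast; ring
  rw [h1, PySem.List.pyRange_one_cons (by omega)]
  simp only [List.foldl_cons]
  have hgd0 : ((1 : Int) - 1).toNat = 0 := by norm_num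
  have hgd1 : ((1 : Int)).toNat = 1 := by norm_num
  simp only [hgd0, hgd1, List.getD_cons_zero, List.getD_cons_succ]
  -- reindex: pyRange 2 (k+2) 1 = (pyRange 1 (k+1) 1).map (· + 1)
  have hre : PySem.List.pyRange 2 ((k : Int) + 2) 1
      = (PySem.List.pyRange 1 ((k : Int) + 1) 1).map (fun j => j + 1) := by
    rw [PySem.List.pyRange_one, PySem.List.pyRange_one]
    have : ((k : Int) + 2 - 2).toNat = ((k : Int) + 1 - 1).toNat := by omega
    rw [this, List.map_map]
    apply List.map_congr_left
    intro a _
    simp only [Function.comp_apply]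
    ring
  rw [show ((1 : Int) + 1) = 2 by norm_num, hre, List.foldl_map]
  apply PySem.List.foldl_congr_mem
  intro acc j hj
  have hj1 : 1 ≤ j := (PySem.List.mem_pyRange_one.mp hj).1
  have e1 : (j + 1 - 1).toNat = (j - 1).toNat + 1 := by omega
  have e2 : (j + 1).toNat = j.toNat + 1 := by omega
  have e3 : j.toNat = (j - 1).toNat + 1 := by omega
  rw [e1, e2, e3]
  simp only [List.getD_cons_succ]

theorem index?_getD_shift (q dest : Int) (rest : List Int) (p : Int) (hne : p ≠ dest)
    (hmem : dest ∈ q :: rest) :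
    (PySem.List.index? (p :: q :: rest) dest).getD 0
      = (PySem.List.index? (q :: rest) dest).getD 0 + 1 := by
  rw [PySem.List.index?_cons_of_ne (q :: rest) hne]
  rcases Option.isSome_iff_exists.mp
    ((PySem.List.index?_isSome_iff (q :: rest) dest).mpr hmem) with ⟨k, hk⟩
  rw [hk]; rfl

-- the main lemma: the hole sift-up equals B's three staged passes
theorem siftHole_eq_chain : ∀ (n : Nat) (pos : Int), pos.toNat = n →
    ∀ (H : List (Int × Int)) (item : Int × Int), pyIdx H.length pos < H.length →
    (shiftDown (buildChain pos)
        ((PySem.List.index? (buildChain pos)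
          (findDest H item ((buildChain pos).drop 1) pos)).getD 0) H).set
      (pyIdx H.length (findDest H item ((buildChain pos).drop 1) pos)) item
    = siftHole H pos item := by
  intro n
  induction n using Nat.strong_induction_on with
  | _ n ih =>
    intro pos hn H item hlt
    by_cases hp : 0 < pos
    · have hchain : buildChain pos = pos :: buildChain (pos / 2) := by
        rw [buildChain_eq, if_pos hp]
      obtain ⟨rest, hrest⟩ := buildChain_head (pos / 2)
      have hip : pyIdx H.length pos = pos.toNat := by unfold pyIdx; split <;> omega
      rw [hchain, hrest]
      simp only [List.drop_succ_cons, List.drop_zero]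
      rw [siftHole]
      by_cases hc : pairLt item (H.getD (pyIdx H.length (pos / 2)) (0, 0)) = true
      · rw [dif_pos ⟨hp, hc⟩]
        rw [findDest_cons, if_pos hc]
        set dest := findDest H item rest (pos / 2) with hdest
        set H2 := H.set (pyIdx H.length pos) (H.getD (pyIdx H.length (pos / 2)) (0, 0)) with hH2
        have hbelow : ∀ r ∈ (pos / 2) :: rest, 0 ≤ r ∧ r < pos := by
          intro r hr
          have := buildChain_le (pos / 2).toNat (pos / 2) rfl (by omega) r (hrest ▸ hr)
          omega
        have hdm : dest ∈ (pos / 2) :: rest := by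
          rcases findDest_mem H item rest (pos / 2) with h | h
          · rw [hdest, h]; exact List.mem_cons_self
          · rw [hdest]; exact List.mem_cons_of_mem _ h
        have hdlt := hbelow dest hdm
        have hne : pos ≠ dest := by omega
        have hinv : findDest H2 item rest (pos / 2) = dest := by
          rw [hH2, hip, hdest]
          exact findDest_set_high H item _ pos hp rest (pos / 2)
            (fun r hr => hbelow r (List.mem_cons_of_mem _ hr))
        rw [index?_getD_shift (pos / 2) dest rest pos hne hdm]
        rw [shiftDown_cons pos (pos / 2) rest _ H, ← hH2]
        have hlt2 : pyIdx H2.length (pos / 2) < H2.length := by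
          rw [hH2]; simp only [List.length_set]
          rw [hip] at hlt
          unfold pyIdx; split <;> omega
        have hIH := ih (pos / 2).toNat (by omega) (pos / 2) rfl H2 item hlt2
        rw [hrest] at hIH
        simp only [List.drop_succ_cons, List.drop_zero] at hIH
        rw [hinv] at hIH
        have hlen : H2.length = H.length := by rw [hH2]; simp
        rw [hlen] at hIH
        exact hIH
      · rw [dif_neg (fun h => hc h.2)]
        rw [findDest_cons, if_neg hc, PySem.List.index?_cons_self pos ((pos / 2) :: rest)]
        simp only [Option.getD_some]
        rw [shiftDown_zero]
    · have hchain : buildChain pos = [pos] := by rw [buildChain_eq, if_neg hp]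
      rw [hchain]
      simp only [List.drop_succ_cons, List.drop_zero]
      rw [findDest_nil, PySem.List.index?_cons_self pos []]
      simp only [Option.getD_some]
      rw [shiftDown_zero, siftHole, dif_neg (fun h => hp h.1)]

-- ===== VERDICT (by name: the statement is the Claim_ definition above) =====

theorem heapreplace_spec : Claim_equal_heapreplace := by
  intro H pos new _ hpre
  unfold Spec_heapreplace heapreplace heapreplace_alt
  obtain ⟨h1, h2⟩ := hpre
  have hi : pyIdx H.length pos < H.length := by
    unfold pyIdx; split <;> omega
  by_cases hg : (H.getD (pyIdx H.length pos) ((0 : Int), (0 : Int))).1 ≤ new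
  · simp only [hg, if_true]
  · simp only [hg, if_false]
    rw [siftSwap_eq_siftHole pos.toNat pos rfl H _ hi]
    rw [← siftHole_eq_chain pos.toNat pos rfl H _ hi]
    congr 1
    rw [shiftDown_length]
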